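-- pv_equiv track=rewrite | github.com/fleximeter/mutil_pub | pctheory/pcset.py | _weight_left
-- ===== SOURCE A (Python) =====
-- def _weight_left(pclists: list):
--     """
--     Weights pclists left
--     :param pclists: Pclists
--     :return: The most weighted form
--     """
--     if len(pclists) > 1:
--         # The smallest item at the current index
--         smallest_item = 11
--
--         # Identify the smallest item at the last index
--         for j in range(0, len(pclists)):
--             if pclists[j][len(pclists[0]) - 1] < smallest_item:
--                 smallest_item = pclists[j][len(pclists[0]) - 1]
--
--         # Remove all lists with larger items at the current index
--         j = 0
--         while j < len(pclists):
--             if pclists[j][len(pclists[0]) - 1] > smallest_item: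
--                 del pclists[j]
--             else:
--                 j += 1
--
--         # Continue processing, but now pack from the left
--         for i in range(0, len(pclists[0])):
--             if len(pclists) > 1:
--                 smallest_item = 11
--
--                 # Identify the smallest item at the current index
--                 for j in range(len(pclists)):
--                     if pclists[j][i] < smallest_item:
--                         smallest_item = pclists[j][i]
--
--                 # Remove all lists with larger items at the current index
--                 j = 0
--                 while j < len(pclists):
--                     if pclists[j][i] > smallest_item:
--                         del pclists[j]
--                     else:
--                         j += 1
--             else:
--                 break
--     return pclists[0]
-- ===== SOURCE B (Python) =====
-- def _weight_left(pclists: list):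
--     """
--     Weights pclists left
--     :param pclists: Pclists
--     :return: The most weighted form
--     """
--     if len(pclists) <= 1:
--         return pclists[0]
--     best = min(pclists, key=lambda p: (p[-1], *p))
--     key = (best[-1], *best)
--     pclists[:] = [p for p in pclists if (p[-1], *p) == key]
--     return pclists[0]
-- ===== Notes on version B (the rewrite author's own statement) =====
-- stated objective: simpler
-- what changed: Replaces A's seeded per-column narrowing (a min scan plus a deletion pass for the last column and then for every column left to right) with a single min over the lexicographic key (p[-1], *p) followed by one filter pass.
-- outside the precondition, e.g. on _weight_left([[0, 1], [0, 1, 0]]): A returns [0, 1], B returns [0, 1, 0]; on _weight_left([[12, 0], [0, 1]]): A returns [12, 0], B returns [12, 0]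
import Mathlib
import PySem

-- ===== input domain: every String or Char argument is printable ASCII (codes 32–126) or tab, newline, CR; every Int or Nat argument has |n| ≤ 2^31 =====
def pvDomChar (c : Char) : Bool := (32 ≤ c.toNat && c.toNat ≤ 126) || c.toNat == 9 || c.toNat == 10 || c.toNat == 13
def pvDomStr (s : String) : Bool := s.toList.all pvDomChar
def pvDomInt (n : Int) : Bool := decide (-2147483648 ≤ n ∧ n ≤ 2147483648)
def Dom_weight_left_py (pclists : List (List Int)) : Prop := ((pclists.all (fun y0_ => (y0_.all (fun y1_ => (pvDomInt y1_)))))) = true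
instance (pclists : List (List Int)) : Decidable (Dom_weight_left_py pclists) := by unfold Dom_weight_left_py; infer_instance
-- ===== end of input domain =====

-- B replaces A's per-column narrowing passes with one lexicographic min over the key (p[-1], *p)
-- plus one filter pass (simpler, same asymptotic cost). A mutates `pclists` in place (deletes the
-- losing lists); B performs the equivalent in-place replacement; the equivalence proved here is
-- about the RETURN value.

-- ===== PORT A =====
-- the `for j in range(len(pclists)): if pclists[j][i] < smallest: smallest = pclists[j][i]` scan
def wlMin (i : Int) (ps : List (List Int)) : Int :=
  ps.foldl (fun s p => if PySem.List.pyGetD p i 0 < s then PySem.List.pyGetD p i 0 else s) 11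

-- the `j = 0; while j < len(pclists): if pclists[j][i] > smallest: del pclists[j] else: j += 1` pass
def wlDel (i : Int) (m : Int) : List (List Int) → List (List Int)
  | [] => []
  | p :: rest => if PySem.List.pyGetD p i 0 > m then wlDel i m rest else p :: wlDel i m rest

-- one iteration of A's `for i in ...` loop body; A's `break` once len ≤ 1 is rendered as the
-- identity on the remaining iterations (once the length is ≤ 1 it stays ≤ 1, so this is exact)
def wlPass (ps : List (List Int)) (i : Int) : List (List Int) :=
  if 1 < ps.length then wlDel i (wlMin i ps) ps else ps

def weight_left_py (pclists : List (List Int)) : List Int :=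
  if 1 < pclists.length then
    let last : Int := ((PySem.List.pyGetD pclists 0 ([] : List Int)).length : Int) - 1
    let ps1 := wlDel last (wlMin last pclists) pclists
    let ps2 := (PySem.List.pyRange 0 ((PySem.List.pyGetD ps1 0 ([] : List Int)).length : Int) 1).foldl wlPass ps1
    PySem.List.pyGetD ps2 0 []
  else PySem.List.pyGetD pclists 0 []

-- ===== PORT B =====
-- the key tuple (p[-1], *p); Python tuple comparison of int tuples = lexicographic List Int order
def pvKey (p : List Int) : List Int := PySem.List.pyGetD p (-1) 0 :: p

def weight_left_py_alt (pclists : List (List Int)) : List Int :=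
  if pclists.length ≤ 1 then PySem.List.pyGetD pclists 0 []
  else
    let best := PySem.List.minD pclists pvKey []
    let survivors := pclists.filter (fun p => pvKey p == pvKey best)
    PySem.List.pyGetD survivors 0 []

-- ===== PRECONDITION & SPEC =====
-- Pre_ restricts to inputs on which A's seeded narrowing is reliable: a nonempty argument whose
-- lists (when there is more than one) are nonempty, of equal length, and contain a list that is
-- minimal for the key (last entry, then the entries left to right) with all of its entries ≤ 11
-- (the pitch-class range).  Outside it A's behaviour is an artefact: its seed `smallest_item = 11`
-- can delete every list and raise IndexError when a column minimum exceeds 11, and on ragged lists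
-- A ignores trailing entries (or raises) — excluded as outside the natural domain rather than matched.
def Pre_weight_left_py (pclists : List (List Int)) : Prop :=
  pclists ≠ [] ∧
  (pclists.length ≤ 1 ∨
    (pclists.headD [] ≠ [] ∧
     (∀ p ∈ pclists, p.length = (pclists.headD []).length) ∧
     ∃ b ∈ pclists, (∀ x ∈ b, x ≤ 11) ∧
       ∀ q ∈ pclists, ¬ (q.getLastD 0 :: q) < (b.getLastD 0 :: b)))
instance (pclists : List (List Int)) : Decidable (Pre_weight_left_py pclists) := by
  unfold Pre_weight_left_py; infer_instance

def pvWitness_weight_left_py : List (List Int) := [[0, 2, 7], [2, 7, 0], [7, 0, 2]]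

def Spec_weight_left_py (pclists : List (List Int)) (out : List Int) : Prop := out = weight_left_py_alt pclists
instance (pclists : List (List Int)) (out : List Int) : Decidable (Spec_weight_left_py pclists out) := by unfold Spec_weight_left_py; infer_instance

-- ===== CLAIM (what is proved, stated in full; the proofs are below) =====
def Claim_equal_weight_left_py : Prop := ∀ (pclists : List (List Int)), Dom_weight_left_py pclists → Pre_weight_left_py pclists → Spec_weight_left_py pclists (weight_left_py pclists)

-- ===== LEMMAS AND PROOFS =====

-- the projection of p onto a list of column indices
def wlProj (js : List Int) (p : List Int) : List Int := js.map (fun j => PySem.List.pyGetD p j 0)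

-- the column-wise minimum key, mirroring A's narrowing
def wlLexMinK : List Int → List (List Int)  → List Int
  | [], _ => []
  | j :: rest, ps =>
    wlMin j ps :: wlLexMinK rest (ps.filter (fun p => PySem.List.pyGetD p j 0 == wlMin j ps))

theorem wlMin_le_init (l : List Int) (s : Int) :
    l.foldl (fun s v => if v < s then v else s) s ≤ s := by
  induction l generalizing s with
  | nil => simp
  | cons v t ih =>
    simp only [List.foldl_cons]
    split
    · exact le_trans (ih v) (by omega)
    · exact ih s

theorem wlMin_le_mem (l : List Int) (s : Int) :
    ∀ v ∈ l, l.foldl (fun s v => if v < s then v else s) s ≤ v := by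
  induction l generalizing s with
  | nil => simp
  | cons w t ih =>
    intro v hv
    simp only [List.foldl_cons]
    rcases List.mem_cons.mp hv with rfl | hv
    · split
      · exact wlMin_le_init t v
      · exact le_trans (wlMin_le_init t s) (by omega)
    · split
      · exact ih w v hv
      · exact ih s v hv

theorem wlMin_mem_or_init (l : List Int) (s : Int) :
    l.foldl (fun s v => if v < s then v else s) s = s ∨
      l.foldl (fun s v => if v < s then v else s) s ∈ l := by
  induction l generalizing s with
  | nil => simp
  | cons v t ih =>
    simp only [List.foldl_cons]
    split
    · rcases ih v with h | h
      · exact Or.inr (by simp [h])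
      · exact Or.inr (List.mem_cons_of_mem _ h)
    · rcases ih s with h | h
      · exact Or.inl h
      · exact Or.inr (List.mem_cons_of_mem _ h)

theorem wlMin_eq_foldl (i : Int) (ps : List (List Int)) :
    wlMin i ps = (ps.map (fun p => PySem.List.pyGetD p i 0)).foldl (fun s v => if v < s then v else s) 11 := by
  rw [List.foldl_map]; rfl

theorem pyGetD_le_11 (p : List Int) (i : Int) (h : ∀ x ∈ p, x ≤ 11) :
    PySem.List.pyGetD p i 0 ≤ 11 := by
  by_cases hr : PySem.Raise.InRange p.length i
  · exact h _ (PySem.List.pyGetD_mem p 0 hr)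
  · rw [PySem.List.pyGetD_of_none p i 0 (by rwa [PySem.List.pyGet?_eq_none_iff])]
    omega

theorem wlMin_le (i : Int) (ps : List (List Int)) (p : List Int) (hp : p ∈ ps) :
    wlMin i ps ≤ PySem.List.pyGetD p i 0 := by
  rw [wlMin_eq_foldl]
  exact wlMin_le_mem _ _ _ (List.mem_map_of_mem hp)

theorem wlDel_eq_filter (i : Int) (m : Int) (ps : List (List Int)) :
    wlDel i m ps = ps.filter (fun p => decide (PySem.List.pyGetD p i 0 ≤ m)) := by
  induction ps with
  | nil => rfl
  | cons p t ih =>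
    simp only [wlDel, List.filter_cons]
    by_cases h : PySem.List.pyGetD p i 0 > m
    · rw [if_pos h, ih]
      have : ¬ PySem.List.pyGetD p i 0 ≤ m := by omega
      simp [this]
    · rw [if_neg h, ih]
      have : PySem.List.pyGetD p i 0 ≤ m := by omega
      simp [this]

theorem wlGetLastD (q : List Int) (h : q ≠ []) :
    q.getLastD 0 = PySem.List.pyGetD q (-1) 0 := by
  rw [PySem.List.pyGetD_neg_one q 0 h, List.getLastD_eq_getLast?,
      List.getLast?_eq_some_getLast h]
  rfl

-- A's iterated narrowing is one filter by the projection of any minimal element whose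
-- entries are ≤ 11 (such an element attains every column minimum, so the seed 11 is harmless)
theorem wlFoldl_eq_filter (js : List Int) (ps : List (List Int)) (b : List Int)
    (hb : b ∈ ps) (hb11 : ∀ x ∈ b, x ≤ 11)
    (hmin : ∀ q ∈ ps, ¬ wlProj js q < wlProj js b) :
    js.foldl wlPass ps = ps.filter (fun p => wlProj js p == wlProj js b) := by
  induction js generalizing ps with
  | nil => simp [wlProj]
  | cons j rest ih =>
    -- b attains the column-j minimum
    have hcol : ∀ q ∈ ps, PySem.List.pyGetD b j 0 ≤ PySem.List.pyGetD q j 0 := by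
      intro q hq
      by_contra hlt
      exact hmin q hq (by
        simp only [wlProj, List.map_cons]
        exact List.cons_lt_cons_iff.mpr (Or.inl (by omega)))
    have hbj : wlMin j ps = PySem.List.pyGetD b j 0 := by
      have h1 := wlMin_le j ps b hb
      have h2 : PySem.List.pyGetD b j 0 ≤ wlMin j ps := by
        rcases wlMin_mem_or_init (ps.map (fun p => PySem.List.pyGetD p j 0)) 11 with h | h
        · rw [wlMin_eq_foldl, h]
          exact pyGetD_le_11 b j hb11
        · obtain ⟨q, hq, hv⟩ := List.mem_map.mp h
          rw [wlMin_eq_foldl, ← hv]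
          exact hcol q hq
      omega
    have hpass : wlPass ps j = ps.filter (fun p => PySem.List.pyGetD p j 0 == wlMin j ps) := by
      unfold wlPass
      split
      · rw [wlDel_eq_filter]
        refine List.filter_congr fun p hp => ?_
        have h1 := wlMin_le j ps p hp
        rw [Bool.eq_iff_iff]
        simp only [decide_eq_true_eq, beq_iff_eq]
        constructor <;> (intro; omega)
      · rename_i hl
        have hps : ps = [b] := by
          cases ps with
          | nil => simp at hb
          | cons p0 t0 =>
            cases t0 with
            | nil => simp_all
            | cons _ _ => simp at hl
        subst hps
        simp [hbj]
    have hbS : b ∈ ps.filter (fun p => PySem.List.pyGetD p j 0 == wlMin j ps) :=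
      List.mem_filter.mpr ⟨hb, by simp [hbj]⟩
    have hminS : ∀ q ∈ ps.filter (fun p => PySem.List.pyGetD p j 0 == wlMin j ps),
        ¬ wlProj rest q < wlProj rest b := by
      intro q hq hlt
      have hqj : PySem.List.pyGetD q j 0 = wlMin j ps := by
        have := (List.mem_filter.mp hq).2; simpa using this
      apply hmin q (List.mem_of_mem_filter hq)
      simp only [wlProj, List.map_cons]
      exact List.cons_lt_cons_iff.mpr (Or.inr ⟨by rw [hqj, hbj], hlt⟩)
    rw [List.foldl_cons, hpass, ih _ hbS hminS, List.filter_filter]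
    refine List.filter_congr fun p hp => ?_
    simp only [wlProj, List.map_cons, List.cons_beq_cons]
    rw [Bool.and_comm, hbj]

-- on a list of length L ≥ 1, the projection onto columns (L-1) :: 0..L-1 is the key (p[-1], *p)
theorem wlProj_eq_key (p : List Int) (L : Nat) (hL : p.length = L) (h1 : 1 ≤ L) :
    wlProj (((L : Int) - 1) :: PySem.List.pyRange 0 (L : Int) 1) p = pvKey p := by
  subst hL
  have hpne : p ≠ [] := by
    intro h; subst h; simp at h1
  simp only [wlProj, pvKey, List.map_cons]
  congr 1
  · rw [PySem.List.pyGetD_eq_getElem p 0 (by omega) (by omega),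
        PySem.List.pyGetD_neg_one p 0 hpne, List.getLast_eq_getElem]
    have ht : ((p.length : Int) - 1).toNat = p.length - 1 := by omega
    simp [ht]
  · exact PySem.List.map_pyGetD_pyRange_zero' p 0

-- ===== VERDICT (by name: the statement is the Claim_ definition above) =====
theorem weight_left_py_spec : Claim_equal_weight_left_py := by
  intro ps _hdom hpre
  obtain ⟨hne, hcase⟩ := hpre
  unfold Spec_weight_left_py
  by_cases hlen : ps.length ≤ 1
  · unfold weight_left_py weight_left_py_alt
    rw [if_neg (by omega), if_pos hlen]
  · rcases hcase with h | ⟨hh, hlens, b, hbmem, hb11, hbmin⟩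
    · omega
    obtain ⟨h, t, rfl⟩ := List.exists_cons_of_ne_nil hne
    simp only [List.headD_cons] at hh hlens
    set L := h.length with hLdef
    have hL1 : 1 ≤ L := by
      cases h with
      | nil => exact absurd rfl hh
      | cons a s => simp [hLdef]
    have hpne : ∀ q ∈ h :: t, q ≠ [] := by
      intro q hq hq0
      have := hlens q hq
      rw [hq0] at this
      simp at this
      omega
    have hpv : ∀ q ∈ h :: t, pvKey q = q.getLastD 0 :: q := by
      intro q hq
      unfold pvKey
      rw [wlGetLastD q (hpne q hq)]
    have hkey : ∀ q ∈ h :: t,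
        wlProj (((L : Int) - 1) :: PySem.List.pyRange 0 (L : Int) 1) q = q.getLastD 0 :: q := by
      intro q hq
      rw [wlProj_eq_key q L (hlens q hq) hL1, hpv q hq]
    have hminP : ∀ q ∈ h :: t,
        ¬ wlProj (((L : Int) - 1) :: PySem.List.pyRange 0 (L : Int) 1) q
          < wlProj (((L : Int) - 1) :: PySem.List.pyRange 0 (L : Int) 1) b := by
      intro q hq
      rw [hkey q hq, hkey b hbmem]
      exact hbmin q hq
    -- A's side
    unfold weight_left_py
    rw [if_pos (by omega)]
    simp only [PySem.List.pyGetD_zero_cons]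
    have hpass1 : wlDel ((L : Int) - 1) (wlMin ((L : Int) - 1) (h :: t)) (h :: t)
        = wlPass (h :: t) ((L : Int) - 1) := by
      unfold wlPass; rw [if_pos (by omega)]
    rw [hpass1]
    -- the first survivor list is nonempty (b survives) and its head has length L
    have hps1 : wlPass (h :: t) ((L : Int) - 1)
        = (((L : Int) - 1) :: ([] : List Int)).foldl wlPass (h :: t) := by
      simp [List.foldl_cons]
    have hps1f : wlPass (h :: t) ((L : Int) - 1)
        = (h :: t).filter (fun p => wlProj [((L : Int) - 1)] p == wlProj [((L : Int) - 1)] b) := by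
      rw [hps1]
      exact wlFoldl_eq_filter [((L : Int) - 1)] (h :: t) b hbmem hb11 (by
        intro q hq hlt
        apply hminP q hq
        simp only [wlProj, List.map_cons, List.map_nil] at hlt ⊢
        rcases List.cons_lt_cons_iff.mp hlt with hx | ⟨hx, hf⟩
        · exact List.cons_lt_cons_iff.mpr (Or.inl hx)
        · exact absurd hf (lt_irrefl _))
    have hps1ne : wlPass (h :: t) ((L : Int) - 1) ≠ [] := by
      rw [hps1f]
      intro hnil
      have : b ∈ ([] : List (List Int)) := by
        rw [← hnil]; exact List.mem_filter.mpr ⟨hbmem, by simp⟩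
      simp at this
    obtain ⟨q1, t1, hq1⟩ := List.exists_cons_of_ne_nil hps1ne
    have hq1mem : q1 ∈ h :: t := by
      have : q1 ∈ wlPass (h :: t) ((L : Int) - 1) := by rw [hq1]; simp
      rw [hps1f] at this
      exact List.mem_of_mem_filter this
    have hq1len : ((PySem.List.pyGetD (wlPass (h :: t) ((L : Int) - 1)) 0 ([] : List Int)).length : Int) = (L : Int) := by
      rw [hq1, PySem.List.pyGetD_zero_cons]
      exact_mod_cast hlens q1 hq1mem
    rw [hq1len]
    have hfold : (PySem.List.pyRange 0 (L : Int) 1).foldl wlPass (wlPass (h :: t) ((L : Int) - 1))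
        = (((L : Int) - 1) :: PySem.List.pyRange 0 (L : Int) 1).foldl wlPass (h :: t) := by
      simp [List.foldl_cons]
    rw [hfold, wlFoldl_eq_filter _ _ b hbmem hb11 hminP]
    -- B's side
    unfold weight_left_py_alt
    rw [if_neg hlen]
    cases hm : PySem.List.min? (h :: t) pvKey with
    | none => rw [PySem.List.min?_eq_none_iff] at hm; simp at hm
    | some m =>
      have hmD : PySem.List.minD (h :: t) pvKey [] = m := by
        unfold PySem.List.minD; rw [hm]; rfl
      rw [hmD]
      have hmem : m ∈ h :: t := PySem.List.min?_mem hm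
      have hm2 : @PySem.List.min? (List Int) (List Int) List.instLinearOrder.toLT
          LinearOrder.toDecidableLT (h :: t) pvKey = some m := by
        rw [show (LinearOrder.toDecidableLT : DecidableLT (List Int))
              = (fun a b => a.decidableLT b)
            from funext fun a => funext fun b => Subsingleton.elim _ _]
        exact hm
      have hminm : ∀ q ∈ h :: t, pvKey m ≤ pvKey q := PySem.List.min?_isMin hm2
      -- the two minimal keys coincide, hence so do the two filters
      have hkeq : pvKey b = pvKey m := by
        have h2 : ¬ pvKey m < pvKey b := by
          rw [hpv m hmem, hpv b hbmem]
          exact hbmin m hmem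
        exact le_antisymm (not_lt.mp h2) (hminm b hbmem)
      have hfilters : (h :: t).filter
            (fun p => wlProj (((L : Int) - 1) :: PySem.List.pyRange 0 (L : Int) 1) p
              == wlProj (((L : Int) - 1) :: PySem.List.pyRange 0 (L : Int) 1) b)
          = (h :: t).filter (fun p => pvKey p == pvKey m) := by
        refine List.filter_congr fun p hp => ?_
        rw [hkey p hp, hkey b hbmem, hpv p hp, ← hkeq, hpv b hbmem]
      rw [hfilters]
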